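-- pv_equiv track=rewrite | github.com/chemosim-lab/ProLIF | prolif/io/cif.py | _block_decompose
-- ===== SOURCE A (Python) =====
-- def _block_decompose(data_block: list) -> tuple:
--     """
--     Decomposes a CIF data block into decriptive information and tables.
--
--     .. versionadded:: 2.1.0
--     """
--     descriptions: list[str] = []
--     data_tables: list[list] = []
--     data_table: list[str] | None = None
--
--     for idx, block_line in enumerate(data_block):
--         if block_line.startswith("#"):
--             if data_table is not None:
--                 # save the current table
--                 data_tables.append(data_table)
--             # reset the table
--             data_table = None
--         elif block_line.startswith("loop_"):
--             # table format
--             data_table = []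
--         elif data_table is not None:
--             # add data to the current table
--             data_table.append(block_line)
--             if idx == len(data_block) - 1:  # last line of the block
--                 # save the final table
--                 data_tables.append(data_table)
--         else:
--             descriptions.append(block_line)
--
--     return descriptions, data_tables
-- ===== SOURCE B (Python) =====
-- def _block_decompose(data_block: list) -> tuple:
--     # Partition the block into '#'-terminated segments, then handle each segment
--     # with index arithmetic instead of a fused running state machine.
--     segments = []
--     current = []
--     for line in data_block:
--         if line.startswith("#"):
--             segments.append((current, True))
--             current = []
--         else:
--             current.append(line)
--     segments.append((current, False))
--
--     descriptions = []
--     data_tables = []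
--     for lines, closed in segments:
--         loop_idxs = [i for i, l in enumerate(lines) if l.startswith("loop_")]
--         if not loop_idxs:
--             descriptions.extend(lines)
--             continue
--         descriptions.extend(lines[: loop_idxs[0]])
--         table = lines[loop_idxs[-1] + 1 :]
--         if closed or table:
--             data_tables.append(table)
--     return descriptions, data_tables
-- ===== Notes on version B (the rewrite author's own statement) =====
-- stated objective: alternative
-- what changed: Replaces A's single fused state machine (with an is-last-line index check inside the loop) by a two-phase decomposition: first partition the block into '#'-terminated segments, then derive each segment's descriptions and table from the positions of its first and last 'loop_' line via slicing.
import Mathlib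
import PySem

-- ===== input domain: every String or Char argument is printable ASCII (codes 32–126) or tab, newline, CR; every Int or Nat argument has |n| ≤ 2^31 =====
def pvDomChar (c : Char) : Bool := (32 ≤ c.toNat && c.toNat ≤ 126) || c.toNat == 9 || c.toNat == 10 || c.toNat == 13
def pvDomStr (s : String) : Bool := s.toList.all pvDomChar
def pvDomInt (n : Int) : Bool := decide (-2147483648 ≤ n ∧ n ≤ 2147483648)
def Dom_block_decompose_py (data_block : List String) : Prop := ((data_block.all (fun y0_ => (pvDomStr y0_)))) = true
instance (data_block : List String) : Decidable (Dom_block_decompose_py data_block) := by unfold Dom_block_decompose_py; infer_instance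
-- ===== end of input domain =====

-- B replaces A's fused index-checking state machine by a partition-into-'#'-segments pass
-- followed by per-segment index arithmetic (objective: alternative decomposition, same cost).

-- ===== PORT A =====
-- A-side helper: the body of A's for-loop; state = (descriptions, data_tables, data_table)
def aStep (n : Nat) (s : List String × List (List String) × Option (List String))
    (p : Int × String) : List String × List (List String) × Option (List String) :=
  if PySem.Str.startswith p.2 "#" then
    match s.2.2 with
    | some t => (s.1, s.2.1 ++ [t], none)
    | none => (s.1, s.2.1, none)
  else if PySem.Str.startswith p.2 "loop_" then (s.1, s.2.1, some [])
  else match s.2.2 with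
    | some t =>
      if p.1 = (n : Int) - 1 then (s.1, s.2.1 ++ [t ++ [p.2]], some (t ++ [p.2]))
      else (s.1, s.2.1, some (t ++ [p.2]))
    | none => (s.1 ++ [p.2], s.2.1, none)

def block_decompose_py (data_block : List String) : List String × List (List String) :=
  let st := (PySem.List.enumerate data_block).foldl (aStep data_block.length) ([], [], none)
  (st.1, st.2.1)

-- ===== PORT B =====
-- B-side helper: segmentation step; state = (finished segments with their closed flag, current segment)
def bSplitStep (s : List (List String × Bool) × List String) (line : String) :
    List (List String × Bool) × List String :=
  if PySem.Str.startswith line "#" then (s.1 ++ [(s.2, true)], [])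
  else (s.1, s.2 ++ [line])

-- B-side helper: process one segment (lines, closed) into (descriptions, data_tables)
def bSegStep (acc : List String × List (List String)) (seg : List String × Bool) :
    List String × List (List String) :=
  match ((PySem.List.enumerate seg.1).filter
      (fun q => PySem.Str.startswith q.2 "loop_")).map (·.1) with
  | [] => (acc.1 ++ seg.1, acc.2)
  | i :: rest =>
    let descriptions := acc.1 ++ PySem.List.slice seg.1 none (some i)
    let table := PySem.List.slice seg.1 (some ((i :: rest).getLast (List.cons_ne_nil i rest) + 1)) none
    if seg.2 || !table.isEmpty then (descriptions, acc.2 ++ [table])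
    else (descriptions, acc.2)

def block_decompose_py_alt (data_block : List String) : List String × List (List String) :=
  let p := data_block.foldl bSplitStep ([], [])
  (p.1 ++ [(p.2, false)]).foldl bSegStep ([], [])

-- ===== PRECONDITION & SPEC =====
def Spec_block_decompose_py (data_block : List String) (out : List String × List (List String)) : Prop := out = block_decompose_py_alt data_block
instance (data_block : List String) (out : List String × List (List String)) : Decidable (Spec_block_decompose_py data_block out) := by unfold Spec_block_decompose_py; infer_instance

-- ===== CLAIM (what is proved, stated in full; the proofs are below) =====
def Claim_equal_block_decompose_py : Prop := ∀ (data_block : List String), Dom_block_decompose_py data_block → Spec_block_decompose_py data_block (block_decompose_py data_block)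

-- ===== LEMMAS AND PROOFS =====

-- A's loop body with the last-line test removed
def stepA (s : List String × List (List String) × Option (List String)) (line : String) :
    List String × List (List String) × Option (List String) :=
  if PySem.Str.startswith line "#" then
    match s.2.2 with
    | some t => (s.1, s.2.1 ++ [t], none)
    | none => (s.1, s.2.1, none)
  else if PySem.Str.startswith line "loop_" then (s.1, s.2.1, some [])
  else match s.2.2 with
    | some t => (s.1, s.2.1, some (t ++ [line]))
    | none => (s.1 ++ [line], s.2.1, none)

-- finalisation: A saves a trailing non-empty open table
def finA (s : List String × List (List String) × Option (List String)) :
    List String × List (List String) :=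
  match s.2.2 with
  | some t => if t = [] then (s.1, s.2.1) else (s.1, s.2.1 ++ [t])
  | none => (s.1, s.2.1)

-- content of an open table after reading further segment lines
def segTab (t : List String) : List String → List String
  | [] => t
  | l :: rest => if PySem.Str.startswith l "loop_" then segTab [] rest else segTab (t ++ [l]) rest

-- (descriptions, final open table) produced by one '#'-free segment
def segRun : List String → List String × Option (List String)
  | [] => ([], none)
  | l :: rest =>
    if PySem.Str.startswith l "loop_" then ([], some (segTab [] rest))
    else (l :: (segRun rest).1, (segRun rest).2)

-- positions of the 'loop_' lines, as naturals
def natIdxs : List String → List Nat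
  | [] => []
  | l :: rest =>
    (if PySem.Str.startswith l "loop_" then [0] else []) ++ (natIdxs rest).map (· + 1)

lemma enumerate_append_singleton {α : Type} (xs : List α) (y : α) (k : Int) :
    PySem.List.enumerate (xs ++ [y]) k = PySem.List.enumerate xs k ++ [(k + xs.length, y)] := by
  induction xs generalizing k <;> simp_all [PySem.List.enumerate_cons, PySem.List.enumerate] <;> ring_nf

lemma foldA_some (lines : List String) (D : List String) (T : List (List String)) (t : List String)
    (h : ∀ l ∈ lines, PySem.Chars.startswith l.toList ['#'] = false) :
    lines.foldl stepA (D, T, some t) = (D, T, some (segTab t lines)) := by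
  induction lines generalizing t with
  | nil => simp [segTab]
  | cons l rest ih =>
    have hl := h l (by simp)
    have hrest := fun x hx => h x (List.mem_cons_of_mem _ hx)
    by_cases hlp : PySem.Chars.startswith l.toList ['l', 'o', 'o', 'p', '_'] = true
    · simp [stepA, segTab, hl, hlp, ih [] hrest]
    · simp [stepA, segTab, hl, hlp, ih (t ++ [l]) hrest]

lemma foldA_none (lines : List String) (D : List String) (T : List (List String))
    (h : ∀ l ∈ lines, PySem.Chars.startswith l.toList ['#'] = false) :
    lines.foldl stepA (D, T, none) = (D ++ (segRun lines).1, T, (segRun lines).2) := by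
  induction lines generalizing D with
  | nil => simp [segRun]
  | cons l rest ih =>
    have hl := h l (by simp)
    have hrest := fun x hx => h x (List.mem_cons_of_mem _ hx)
    by_cases hlp : PySem.Chars.startswith l.toList ['l', 'o', 'o', 'p', '_'] = true
    · simp [stepA, segRun, hl, hlp, foldA_some rest D T [] hrest]
    · simp [stepA, segRun, hl, hlp, ih (D ++ [l]) hrest]

lemma loopIdxs_eq (lines : List String) (k : Nat) :
    ((PySem.List.enumerate lines (k : Int)).filter
        (fun q => PySem.Str.startswith q.2 "loop_")).map (·.1)
      = (natIdxs lines).map (fun p => ((k + p : Nat) : Int)) := by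
  induction lines generalizing k with
  | nil => simp [natIdxs, PySem.List.enumerate]
  | cons l rest ih =>
    have hshift : ((k : Int) + 1) = ((k + 1 : Nat) : Int) := by push_cast; ring
    rw [PySem.List.enumerate_cons, List.filter_cons]
    by_cases hlp : PySem.Str.startswith l "loop_" = true
    · simp only [hlp, if_true, List.map_cons, natIdxs, List.singleton_append]
      rw [hshift, ih (k + 1)]
      refine congrArg₂ _ (by omega) ?_
      rw [List.map_map]
      exact List.map_congr_left (fun p _ => by simp only [Function.comp_apply]; omega)
    · simp only [hlp, if_false, natIdxs, List.nil_append, Bool.false_eq_true]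
      rw [hshift, ih (k + 1), List.map_map]
      exact List.map_congr_left (fun p _ => by simp only [Function.comp_apply]; omega)

lemma segTab_eq_nil (lines : List String) (t : List String) (h : natIdxs lines = []) :
    segTab t lines = t ++ lines := by
  induction lines generalizing t with
  | nil => simp [segTab]
  | cons l rest ih =>
    simp only [natIdxs, List.append_eq_nil_iff, List.map_eq_nil_iff] at h
    obtain ⟨h1, h2⟩ := h
    have hlp : ¬ PySem.Str.startswith l "loop_" = true := by
      intro hc; rw [if_pos hc] at h1; exact absurd h1 (by simp)
    simp only [segTab, if_neg hlp]
    rw [ih (t ++ [l]) h2]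
    simp

lemma natIdxs_cons_getLast (l : String) (rest : List String) (h : natIdxs rest ≠ []) :
    (natIdxs (l :: rest)).getLast?.getD 0 = (natIdxs rest).getLast?.getD 0 + 1 := by
  simp only [natIdxs]
  rw [List.getLast?_append_of_ne_nil _ (by simpa using h), List.getLast?_map]
  cases hg : (natIdxs rest).getLast? with
  | none => exact absurd (List.getLast?_eq_none_iff.1 hg) h
  | some v => simp

lemma segTab_eq_cons (lines : List String) (t : List String) (h : natIdxs lines ≠ []) :
    segTab t lines = lines.drop ((natIdxs lines).getLast?.getD 0 + 1) := by
  induction lines generalizing t with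
  | nil => simp [natIdxs] at h
  | cons l rest ih =>
    by_cases hr : natIdxs rest = []
    · have hlp : PySem.Str.startswith l "loop_" = true := by
        by_contra hc
        have hc' : PySem.Chars.startswith l.toList ['l', 'o', 'o', 'p', '_'] = false := by
          simpa using eq_false_of_ne_true hc
        exact h (by simp [natIdxs, hc', hr])
      have hlp' : PySem.Chars.startswith l.toList ['l', 'o', 'o', 'p', '_'] = true := by
        simpa using hlp
      have hN : natIdxs (l :: rest) = [0] := by simp [natIdxs, hlp', hr]
      rw [hN]
      simp only [segTab, if_pos hlp]
      rw [segTab_eq_nil rest [] hr]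
      simp
    · rw [natIdxs_cons_getLast l rest hr, List.drop_succ_cons]
      by_cases hlp : PySem.Str.startswith l "loop_" = true
      · simp only [segTab, if_pos hlp]
        exact ih [] hr
      · simp only [segTab, if_neg hlp]
        exact ih (t ++ [l]) hr

lemma segRun_eq_nil (lines : List String) (h : natIdxs lines = []) :
    segRun lines = (lines, none) := by
  induction lines with
  | nil => simp [segRun]
  | cons l rest ih =>
    simp only [natIdxs, List.append_eq_nil_iff, List.map_eq_nil_iff] at h
    obtain ⟨h1, h2⟩ := h
    have hlp : ¬ PySem.Str.startswith l "loop_" = true := by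
      intro hc; rw [if_pos hc] at h1; exact absurd h1 (by simp)
    simp only [segRun, if_neg hlp]
    rw [ih h2]

lemma segRun_eq_cons (lines : List String) (h : natIdxs lines ≠ []) :
    segRun lines = (lines.take ((natIdxs lines).headD 0),
      some (lines.drop ((natIdxs lines).getLast?.getD 0 + 1))) := by
  induction lines with
  | nil => simp [natIdxs] at h
  | cons l rest ih =>
    by_cases hlp : PySem.Str.startswith l "loop_" = true
    · have hlp' : PySem.Chars.startswith l.toList ['l', 'o', 'o', 'p', '_'] = true := by
        simpa using hlp
      have hhead : (natIdxs (l :: rest)).headD 0 = 0 := by simp [natIdxs, hlp']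
      rw [hhead]
      simp only [segRun, if_pos hlp, List.take_zero]
      by_cases hr : natIdxs rest = []
      · have hN : natIdxs (l :: rest) = [0] := by simp [natIdxs, hlp', hr]
        rw [hN, segTab_eq_nil rest [] hr]
        simp
      · rw [natIdxs_cons_getLast l rest hr, List.drop_succ_cons,
          segTab_eq_cons rest [] hr]
    · have hlp' : PySem.Chars.startswith l.toList ['l', 'o', 'o', 'p', '_'] = false := by
        simpa using eq_false_of_ne_true hlp
      have hr : natIdxs rest ≠ [] := by
        intro hc; exact h (by simp [natIdxs, hlp', hc])
      obtain ⟨i, r, hcons⟩ := List.exists_cons_of_ne_nil hr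
      have hN : natIdxs (l :: rest) = (natIdxs rest).map (· + 1) := by
        simp [natIdxs, hlp']
      have hhead : (natIdxs (l :: rest)).headD 0 = i + 1 := by
        rw [hN, hcons]; simp
      rw [hhead, natIdxs_cons_getLast l rest hr, List.drop_succ_cons, List.take_succ_cons]
      simp only [segRun, if_neg hlp]
      rw [ih hr]
      simp [hcons]

lemma bSegStep_loopIdxs (cur : List String) :
    ((PySem.List.enumerate cur).filter
        (fun q => PySem.Str.startswith q.2 "loop_")).map (·.1)
      = (natIdxs cur).map (fun (p : Nat) => (p : Int)) := by
  have h := loopIdxs_eq cur 0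
  simp only [Nat.cast_zero, Nat.zero_add] at h
  exact h

lemma getLast_cast (i : Nat) (r : List Nat) (h : ((i : Int) :: r.map (fun (p : Nat) => (p : Int))) ≠ []) :
    ((i : Int) :: r.map (fun (p : Nat) => (p : Int))).getLast h
      = (((i :: r).getLast (List.cons_ne_nil i r) : Nat) : Int) := by
  have h1 : ((i : Int) :: r.map (fun (p : Nat) => (p : Int))).getLast?
      = some ((((i :: r).getLast (List.cons_ne_nil i r) : Nat)) : Int) := by
    have h2 : ((i : Int) :: r.map (fun (p : Nat) => (p : Int))) = (i :: r).map (fun (p : Nat) => (p : Int)) := rfl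
    rw [h2, List.getLast?_map, List.getLast?_eq_some_getLast (List.cons_ne_nil i r)]
    rfl
  have h3 := List.getLast?_eq_some_getLast h
  rw [h3] at h1
  exact Option.some.inj h1

lemma bSegStep_false (s : List String × List (List String)) (cur : List String) :
    bSegStep s (cur, false) = finA (s.1 ++ (segRun cur).1, s.2, (segRun cur).2) := by
  cases hN : natIdxs cur with
  | nil =>
    simp only [bSegStep, bSegStep_loopIdxs, hN, List.map_nil]
    rw [segRun_eq_nil cur hN]
    simp [finA]
  | cons i r =>
    simp only [bSegStep, bSegStep_loopIdxs, hN, List.map_cons]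
    rw [segRun_eq_cons cur (by rw [hN]; simp)]
    simp only [finA, hN, getLast_cast]
    have hcast : ((((i :: r).getLast (List.cons_ne_nil i r) : Nat) : Int) + 1)
        = ((((i :: r).getLast (List.cons_ne_nil i r) + 1 : Nat)) : Int) := by push_cast; ring
    rw [hcast, PySem.List.slice_from_natCast, PySem.List.slice_to_natCast]
    have hlq : ((i :: r).getLast?).getD 0 = (i :: r).getLast (List.cons_ne_nil i r) := by
      rw [List.getLast?_eq_some_getLast (List.cons_ne_nil i r)]; rfl
    rw [hlq]
    simp only [List.headD_cons, Bool.false_or]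
    by_cases htab : cur.drop ((i :: r).getLast (List.cons_ne_nil i r) + 1) = [] <;>
      simp [htab]

lemma bSegStep_true (s : List String × List (List String)) (cur : List String) :
    bSegStep s (cur, true)
      = match (segRun cur).2 with
        | some t => (s.1 ++ (segRun cur).1, s.2 ++ [t])
        | none => (s.1 ++ (segRun cur).1, s.2) := by
  cases hN : natIdxs cur with
  | nil =>
    simp only [bSegStep, bSegStep_loopIdxs, hN, List.map_nil]
    rw [segRun_eq_nil cur hN]
  | cons i r =>
    simp only [bSegStep, bSegStep_loopIdxs, hN, List.map_cons]
    rw [segRun_eq_cons cur (by rw [hN]; simp)]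
    simp only [hN, getLast_cast]
    have hcast : ((((i :: r).getLast (List.cons_ne_nil i r) : Nat) : Int) + 1)
        = ((((i :: r).getLast (List.cons_ne_nil i r) + 1 : Nat)) : Int) := by push_cast; ring
    rw [hcast, PySem.List.slice_from_natCast, PySem.List.slice_to_natCast]
    have hlq : ((i :: r).getLast?).getD 0 = (i :: r).getLast (List.cons_ne_nil i r) := by
      rw [List.getLast?_eq_some_getLast (List.cons_ne_nil i r)]; rfl
    rw [hlq]
    simp

lemma bSplit_acc (xs : List String) (S : List (List String × Bool)) (cur : List String) :
    xs.foldl bSplitStep (S, cur)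
      = (S ++ (xs.foldl bSplitStep ([], cur)).1, (xs.foldl bSplitStep ([], cur)).2) := by
  induction xs generalizing S cur with
  | nil => simp
  | cons l rest ih =>
    by_cases hl : PySem.Str.startswith l "#" = true
    · simp only [List.foldl_cons, bSplitStep, if_pos hl]
      rw [ih (S ++ [(cur, true)]) [], ih ([] ++ [(cur, true)]) []]
      simp
    · simp only [List.foldl_cons, bSplitStep, if_neg hl]
      exact ih S (cur ++ [l])

lemma aStep_eq_stepA (n : Nat) (s : List String × List (List String) × Option (List String))
    (p : Int × String) (h : p.1 ≠ (n : Int) - 1) : aStep n s p = stepA s p.2 := by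
  rcases s with ⟨D, T, o⟩
  cases o <;> simp [aStep, stepA, h]

lemma fold_aStep (xs : List String) (k : Int) (n : Nat)
    (s : List String × List (List String) × Option (List String))
    (h : k + xs.length ≤ (n : Int) - 1) :
    (PySem.List.enumerate xs k).foldl (aStep n) s = xs.foldl stepA s := by
  induction xs generalizing k s with
  | nil => simp [PySem.List.enumerate]
  | cons l rest ih =>
    rw [PySem.List.enumerate_cons, List.foldl_cons, List.foldl_cons,
      aStep_eq_stepA n s (k, l) (by simp at h ⊢; omega)]
    exact ih (k + 1) _ (by simp at h ⊢; omega)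

lemma last_step (n : Nat) (s : List String × List (List String) × Option (List String))
    (y : String) :
    ((aStep n s ((n : Int) - 1, y)).1, (aStep n s ((n : Int) - 1, y)).2.1)
      = finA (stepA s y) := by
  rcases s with ⟨D, T, o⟩
  by_cases h1 : PySem.Chars.startswith y.toList ['#'] = true
  · cases o <;> simp [aStep, stepA, finA, h1]
  · by_cases h2 : PySem.Chars.startswith y.toList ['l', 'o', 'o', 'p', '_'] = true
    · cases o <;> simp [aStep, stepA, finA, h1, h2]
    · cases o <;> simp [aStep, stepA, finA, h1, h2]

lemma A_eq (xs : List String) :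
    block_decompose_py xs = finA (xs.foldl stepA ([], [], none)) := by
  induction xs using List.reverseRecOn with
  | nil => simp [block_decompose_py, PySem.List.enumerate, finA]
  | append_singleton ys y _ =>
    simp only [block_decompose_py]
    rw [enumerate_append_singleton ys y 0, List.foldl_append, List.foldl_cons, List.foldl_nil,
      fold_aStep ys 0 (ys ++ [y]).length _ (by simp),
      show ((0 : Int) + ys.length) = (((ys ++ [y]).length : Nat) : Int) - 1 by simp,
      last_step, List.foldl_append, List.foldl_cons, List.foldl_nil]

lemma no_hash_append (cur : List String) (l : String)
    (hcur : ∀ x ∈ cur, PySem.Chars.startswith x.toList ['#'] = false)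
    (hl : ¬ PySem.Str.startswith l "#" = true) :
    ∀ x ∈ cur ++ [l], PySem.Chars.startswith x.toList ['#'] = false := by
  intro x hx
  rcases List.mem_append.1 hx with h | h
  · exact hcur x h
  · have : x = l := by simpa using h
    subst this
    simpa using eq_false_of_ne_true hl

lemma main_lemma (xs : List String) (s : List String × List (List String)) (cur : List String)
    (hcur : ∀ l ∈ cur, PySem.Chars.startswith l.toList ['#'] = false) :
    finA (xs.foldl stepA (s.1 ++ (segRun cur).1, s.2, (segRun cur).2))
      = ((xs.foldl bSplitStep ([], cur)).1
          ++ [((xs.foldl bSplitStep ([], cur)).2, false)]).foldl bSegStep s := by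
  induction xs generalizing s cur with
  | nil => simp [bSegStep_false]
  | cons l rest ih =>
    by_cases hl : PySem.Str.startswith l "#" = true
    · have hl' : PySem.Chars.startswith l.toList ['#'] = true := by simpa using hl
      have hstep : stepA (s.1 ++ (segRun cur).1, s.2, (segRun cur).2) l
          = ((bSegStep s (cur, true)).1, (bSegStep s (cur, true)).2, none) := by
        rw [bSegStep_true]
        cases h : (segRun cur).2 <;> simp [stepA, hl', h]
      rw [List.foldl_cons, hstep]
      have hrec := ih (bSegStep s (cur, true)) [] (by simp)
      simp only [segRun, List.append_nil] at hrec
      rw [hrec, List.foldl_cons]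
      simp only [bSplitStep, if_pos hl, List.nil_append]
      rw [bSplit_acc rest [(cur, true)] []]
      simp
    · have hstep : stepA (s.1 ++ (segRun cur).1, s.2, (segRun cur).2) l
          = (s.1 ++ (segRun (cur ++ [l])).1, s.2, (segRun (cur ++ [l])).2) := by
        have h1 := foldA_none (cur ++ [l]) s.1 s.2 (no_hash_append cur l hcur hl)
        rw [List.foldl_append, List.foldl_cons, List.foldl_nil,
          foldA_none cur s.1 s.2 hcur] at h1
        exact h1
      rw [List.foldl_cons, hstep, ih s (cur ++ [l]) (no_hash_append cur l hcur hl),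
        List.foldl_cons]
      simp only [bSplitStep, if_neg hl]

-- ===== VERDICT (by name: the statement is the Claim_ definition above) =====
theorem block_decompose_py_spec : Claim_equal_block_decompose_py := by
  intro data_block _
  show block_decompose_py data_block = block_decompose_py_alt data_block
  rw [A_eq]
  have hmain := main_lemma data_block ([], []) [] (by simp)
  simp only [segRun, List.append_nil] at hmain
  rw [hmain]
  rfl
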